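-- pv_equiv track=rewrite | github.com/Sirez91/PHL | lateralMovement/python code/helpers/songs.py | getVibrationMessage
-- ===== SOURCE A (Python) =====
-- octaveHighs = [
--     47,
--     59,
--     71,
--     83
-- ]
--
-- def getVibrationMessage(song):
--     i = 0
--     vibration = [];
--     while i < len(song):
--         vibrationWithOctaveJump = [];
--         vibrationAtTheSameTime = [];
--         vibrationAtTheSameTime.append(str(song[i][3]));
--         if i>0:
--             vibrationForOctaveJump = getVibrationForOctaveJump(song[i-1][0], song[i][0]);
--             if vibrationForOctaveJump!='':
--                 vibrationWithOctaveJump.append(vibrationForOctaveJump);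
--         if i+1 != len(song) and song[i+1][2] == 0:
--             vibrationAtTheSameTime.append(str(song[i+1][3]));
--             vibrationForOctaveJump = getVibrationForOctaveJump(song[i][0], song[i+1][0]);
--             if vibrationForOctaveJump!='' and len(vibrationWithOctaveJump) == 0:
--                 vibrationWithOctaveJump.append(vibrationForOctaveJump);
--             i = i+2
--         else:
--             i = i+1
--         vibrationWithOctaveJump.append(';'.join(vibrationAtTheSameTime))
--         vibration.append('#'.join(vibrationWithOctaveJump));
--     return ','.join(vibration);
--
-- def getVibrationForOctaveJump(prevNote, note):
--     if(note == prevNote):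
--         return '';
--     if(note > prevNote):
--         returnValue = '7';
--         i = 0;
--         while i < len(octaveHighs):
--             if(note>octaveHighs[i] and prevNote<=octaveHighs[i]):
--                 return returnValue;
--             i+=1;
--         return '';
--     else:
--         returnValue = '6';
--         i = 0;
--         while i < len(octaveHighs):
--             if(note<=octaveHighs[i] and prevNote>octaveHighs[i]):
--                 return returnValue;
--             i+=1;
--         return '';
-- ===== SOURCE B (Python) =====
-- octaveHighs = [47, 59, 71, 83]
--
-- def _band(note):
--     # octave band index: how many octave boundaries lie strictly below the note
--     return sum(1 for h in octaveHighs if h < note)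
--
-- def getVibrationForOctaveJump(prevNote, note):
--     bp, bn = _band(prevNote), _band(note)
--     if bn > bp:
--         return '7'
--     if bn < bp:
--         return '6'
--     return ''
--
-- def getVibrationMessage(song):
--     # structural recursion over the remaining rows, carrying the previous pitch
--     def render(prev, rest):
--         if not rest:
--             return []
--         head = rest[0]
--         jump = '' if prev is None else getVibrationForOctaveJump(prev, head[0])
--         if len(rest) > 1 and rest[1][2] == 0:
--             snd = rest[1]
--             if jump == '':
--                 jump = getVibrationForOctaveJump(head[0], snd[0])
--             seg = (jump + '#' if jump else '') + str(head[3]) + ';' + str(snd[3])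
--             return [seg] + render(snd[0], rest[2:])
--         seg = (jump + '#' if jump else '') + str(head[3])
--         return [seg] + render(head[0], rest[1:])
--     return ','.join(render(None, song))
-- ===== Notes on version B (the rewrite author's own statement) =====
-- stated objective: alternative
-- what changed: Replaces A's index-based while-loop over the whole array by a structural recursion over list suffixes that threads the previous pitch as state (no indexing back into the song), and replaces the helper's two boundary-scanning while-loops by mapping each pitch to its octave-band index (count of octave boundaries below it) and comparing the two bands.
import Mathlib
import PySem

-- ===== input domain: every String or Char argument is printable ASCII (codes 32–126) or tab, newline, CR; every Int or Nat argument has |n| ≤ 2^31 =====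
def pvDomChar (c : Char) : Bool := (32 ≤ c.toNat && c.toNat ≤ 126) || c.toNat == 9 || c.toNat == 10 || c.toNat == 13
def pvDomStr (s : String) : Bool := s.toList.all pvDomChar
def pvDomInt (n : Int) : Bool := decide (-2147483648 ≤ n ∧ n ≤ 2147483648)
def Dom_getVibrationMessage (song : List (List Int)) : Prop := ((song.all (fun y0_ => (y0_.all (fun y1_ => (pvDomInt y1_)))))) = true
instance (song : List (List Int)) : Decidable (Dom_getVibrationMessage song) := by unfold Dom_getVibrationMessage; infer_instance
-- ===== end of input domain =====

-- B is an alternative implementation: a structural recursion on the list of rows that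
-- threads the previous pitch as state, with the octave jump computed by comparing the
-- octave-band indices of the two pitches.  Equivalence is claimed on songs whose rows
-- all have length ≥ 4 (elsewhere Python A raises IndexError).

-- ===== PORT A =====
def octaveHighsA : List Int := [47, 59, 71, 83]

-- row access song[i][j] with defaults (Pre_ keeps every real access in range)
def pvCell (song : List (List Int)) (i j : Nat) : Int := (song.getD i []).getD j 0

-- while-loop of the '>' branch of getVibrationForOctaveJump (index scan over octaveHighs,
-- written as recursion on the not-yet-scanned tail of the list)
def jumpUpLoop (prevNote note : Int) (rv : String) : List Int → String
  | [] => ""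
  | oh :: rest => if note > oh ∧ prevNote ≤ oh then rv else jumpUpLoop prevNote note rv rest

-- while-loop of the '<' branch
def jumpDownLoop (prevNote note : Int) (rv : String) : List Int → String
  | [] => ""
  | oh :: rest => if note ≤ oh ∧ prevNote > oh then rv else jumpDownLoop prevNote note rv rest

def getVibrationForOctaveJump (prevNote note : Int) : String :=
  if note = prevNote then ""
  else if note > prevNote then jumpUpLoop prevNote note "7" octaveHighsA
  else jumpDownLoop prevNote note "6" octaveHighsA

-- the main while-loop of A
def vibLoop (song : List (List Int)) (i : Nat) (vibration : List String) : List String :=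
  if _h : i < song.length then
    let vWOJ : List String := []
    let vAST : List String := [PySem.Int.toStr (pvCell song i 3)]
    let vWOJ : List String :=
      if i > 0 then
        let v := getVibrationForOctaveJump (pvCell song (i - 1) 0) (pvCell song i 0)
        if v ≠ "" then vWOJ ++ [v] else vWOJ
      else vWOJ
    if i + 1 ≠ song.length ∧ pvCell song (i + 1) 2 = 0 then
      let vAST := vAST ++ [PySem.Int.toStr (pvCell song (i + 1) 3)]
      let v := getVibrationForOctaveJump (pvCell song i 0) (pvCell song (i + 1) 0)
      let vWOJ := if v ≠ "" ∧ vWOJ.length = 0 then vWOJ ++ [v] else vWOJ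
      vibLoop song (i + 2) (vibration ++ [PySem.Str.join "#" (vWOJ ++ [PySem.Str.join ";" vAST])])
    else
      vibLoop song (i + 1) (vibration ++ [PySem.Str.join "#" (vWOJ ++ [PySem.Str.join ";" vAST])])
  else vibration
termination_by song.length - i

def getVibrationMessage (song : List (List Int)) : String :=
  PySem.Str.join "," (vibLoop song 0 [])

-- ===== PORT B =====
def octaveHighsB : List Int := [47, 59, 71, 83]

-- octave band index: how many octave boundaries lie strictly below the note
-- (Python's sum of 1s over a genexp is List.countP)
def bandB (note : Int) : Nat := octaveHighsB.countP (fun h => h < note)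

def jumpAlt (prevNote note : Int) : String :=
  if bandB note > bandB prevNote then "7"
  else if bandB note < bandB prevNote then "6"
  else ""

-- structural recursion over the remaining rows, carrying the previous pitch
def renderB (prev : Option Int) : List (List Int) → List String
  | [] => []
  | head :: rest =>
    let jump : String := match prev with
      | none => ""
      | some p => jumpAlt p (head.getD 0 0)
    match rest with
    | snd :: rest2 =>
      if snd.getD 2 0 = 0 then
        let jump := if jump = "" then jumpAlt (head.getD 0 0) (snd.getD 0 0) else jump
        ((if jump ≠ "" then jump ++ "#" else "") ++ PySem.Int.toStr (head.getD 3 0)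
            ++ ";" ++ PySem.Int.toStr (snd.getD 3 0))
          :: renderB (some (snd.getD 0 0)) rest2
      else
        ((if jump ≠ "" then jump ++ "#" else "") ++ PySem.Int.toStr (head.getD 3 0))
          :: renderB (some (head.getD 0 0)) (snd :: rest2)
    | [] =>
      [(if jump ≠ "" then jump ++ "#" else "") ++ PySem.Int.toStr (head.getD 3 0)]
termination_by l => l.length

def getVibrationMessage_alt (song : List (List Int)) : String :=
  PySem.Str.join "," (renderB none song)

-- ===== PRECONDITION & SPEC =====
-- Pre_: every row has at least 4 entries; on any other song Python A raises IndexError.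
def Pre_getVibrationMessage (song : List (List Int)) : Prop :=
  ∀ row ∈ song, 4 ≤ row.length
instance (song : List (List Int)) : Decidable (Pre_getVibrationMessage song) := by
  unfold Pre_getVibrationMessage; infer_instance

def pvWitness_getVibrationMessage : List (List Int) := [[60, 4, 0, 3], [72, 4, 0, 5], [40, 4, 2, 1]]

def Spec_getVibrationMessage (song : List (List Int)) (out : String) : Prop := out = getVibrationMessage_alt song
instance (song : List (List Int)) (out : String) : Decidable (Spec_getVibrationMessage song out) := by unfold Spec_getVibrationMessage; infer_instance

-- ===== CLAIM (what is proved, stated in full; the proofs are below) =====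
def Claim_equal_getVibrationMessage : Prop := ∀ (song : List (List Int)), Dom_getVibrationMessage song → Pre_getVibrationMessage song → Spec_getVibrationMessage song (getVibrationMessage song)

-- ===== LEMMAS AND PROOFS =====

lemma join_one (sep a : String) : PySem.Str.join sep [a] = a := by
  simp [PySem.Str.join, PySem.Chars.join_singleton]

lemma join_two (sep a b : String) : PySem.Str.join sep [a, b] = a ++ sep ++ b := by
  simp [PySem.Str.join, PySem.Chars.join_cons_cons]
  apply String.toList_injective
  simp

-- A's index scans compute 'rv if some element satisfies the test, else ""'
lemma upLoop_any (p q : Int) (rv : String) (l : List Int) :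
    jumpUpLoop p q rv l = if l.any (fun oh => p ≤ oh ∧ oh < q) then rv else "" := by
  induction l with
  | nil => simp [jumpUpLoop]
  | cons oh rest ih =>
    simp only [jumpUpLoop, List.any_cons, ih]
    by_cases hb : p ≤ oh ∧ oh < q
    · simp [hb]
    · simp [hb, show ¬(q > oh ∧ p ≤ oh) from fun hc => hb ⟨hc.2, hc.1⟩]

lemma downLoop_any (p q : Int) (rv : String) (l : List Int) :
    jumpDownLoop p q rv l = if l.any (fun oh => q ≤ oh ∧ oh < p) then rv else "" := by
  induction l with
  | nil => simp [jumpDownLoop]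
  | cons oh rest ih =>
    simp only [jumpDownLoop, List.any_cons, ih]
    by_cases hb : q ≤ oh ∧ oh < p
    · simp [hb]
    · simp [hb]

-- B's band comparison is exactly 'some boundary lies in [p, q)'
lemma band_lt_iff (p q : Int) :
    (bandB p < bandB q) ↔
      ((p ≤ 47 ∧ 47 < q) ∨ (p ≤ 59 ∧ 59 < q) ∨ (p ≤ 71 ∧ 71 < q) ∨ (p ≤ 83 ∧ 83 < q)) := by
  simp only [bandB, octaveHighsB, List.countP_cons, List.countP_nil, decide_eq_true_eq]
  split_ifs <;> omega

-- A's any-scan over the concrete boundary list, as a disjunction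
lemma any_band (p q : Int) :
    ((octaveHighsB.any fun oh => p ≤ oh ∧ oh < q) = true) ↔
      ((p ≤ 47 ∧ 47 < q) ∨ (p ≤ 59 ∧ 59 < q) ∨ (p ≤ 71 ∧ 71 < q) ∨ (p ≤ 83 ∧ 83 < q)) := by
  simp [octaveHighsB]

-- the two helpers agree
lemma jump_eq (p q : Int) : getVibrationForOctaveJump p q = jumpAlt p q := by
  unfold getVibrationForOctaveJump jumpAlt
  rw [upLoop_any, downLoop_any]
  rw [show octaveHighsA = octaveHighsB from rfl]
  simp only [any_band, band_lt_iff]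
  split_ifs <;> first | rfl | (exfalso; omega)

-- the previous-pitch state B carries at position i of A's loop
def prevOf (song : List (List Int)) (i : Nat) : Option Int :=
  if i = 0 then none else some (pvCell song (i - 1) 0)

lemma cell_drop (song : List (List Int)) (i j : Nat) (h : i < song.length) :
    pvCell song i j = (song[i]).getD j 0 := by
  simp [pvCell, List.getD, List.getElem?_eq_getElem h]

-- A's loop from position i builds exactly B's rendering of the suffix
lemma vibLoop_eq_render (song : List (List Int)) (i : Nat) (vib : List String) :
    vibLoop song i vib = vib ++ renderB (prevOf song i) (song.drop i) := by
  by_cases h : i < song.length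
  · rw [vibLoop]
    simp only [h, dif_pos]
    have hjump : (match prevOf song i with
        | none => ""
        | some p => jumpAlt p ((song[i]'h).getD 0 0)) =
        if i > 0 then getVibrationForOctaveJump (pvCell song (i - 1) 0) (pvCell song i 0) else "" := by
      by_cases hi : i = 0
      · simp [prevOf, hi]
      · simp [prevOf, hi, jump_eq, cell_drop song i 0 h, show i > 0 by omega]
    by_cases hp1 : i + 1 < song.length
    · have hd2 : song.drop (i + 1) = song[i+1] :: song.drop (i + 2) := by
        rw [List.drop_eq_getElem_cons hp1]
      have hd1 : song.drop i = song[i] :: song[i+1] :: song.drop (i + 2) := by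
        rw [List.drop_eq_getElem_cons h, hd2]
      rw [hd1, renderB.eq_def]
      simp only []
      have hc2 : (song[i+1]).getD 2 0 = pvCell song (i + 1) 2 := (cell_drop song (i+1) 2 hp1).symm
      by_cases hz : pvCell song (i + 1) 2 = 0
      · -- pair branch on both sides
        rw [if_pos (⟨by omega, hz⟩ : i + 1 ≠ song.length ∧ pvCell song (i + 1) 2 = 0)]
        simp only [hjump, hc2, hz]
        rw [vibLoop_eq_render song (i + 2)]
        have hprev2 : prevOf song (i + 2) = some ((song[i+1]).getD 0 0) := by
          simp [prevOf, cell_drop song (i+1) 0 hp1]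
        have hrest : List.drop (i + 1 + 1) song = List.drop (i + 2) song := by norm_num
        rw [hrest, hprev2]
        simp only [List.append_assoc, List.singleton_append]
        congr 2
        -- segment strings equal
        rw [cell_drop song i 0 h, cell_drop song i 3 h, cell_drop song (i+1) 0 hp1,
          cell_drop song (i+1) 3 hp1]
        simp only [← jump_eq]
        by_cases hi : 0 < i
        · by_cases hl : getVibrationForOctaveJump (pvCell song (i-1) 0) (song[i][0]?.getD 0) = ""
          · by_cases hw : getVibrationForOctaveJump (song[i][0]?.getD 0) (song[i+1][0]?.getD 0) = "" <;>
              simp [hi, hl, hw, join_one, join_two, String.append_assoc]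
          · simp [hi, hl, join_two, String.append_assoc]
        · by_cases hw : getVibrationForOctaveJump (song[i][0]?.getD 0) (song[i+1][0]?.getD 0) = "" <;>
            simp [hi, hw, join_one, join_two, String.append_assoc]
      · -- i+1 < len but delay ≠ 0: single-note branch, B recurses on the cons tail
        rw [if_neg (by simp [hz])]
        simp only [hjump, hc2, hz]
        rw [vibLoop_eq_render song (i + 1)]
        have hprev1 : prevOf song (i + 1) = some ((song[i]).getD 0 0) := by
          simp [prevOf, cell_drop song i 0 h]
        rw [hprev1, ← hd2]
        simp only [List.append_assoc, List.singleton_append]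
        congr 2
        rw [cell_drop song i 3 h]
        by_cases hi : 0 < i
        · by_cases hl : getVibrationForOctaveJump (pvCell song (i-1) 0) (pvCell song i 0) = "" <;>
            simp [hi, hl, join_one, join_two, String.append_assoc]
        · simp [hi, join_one]
    · -- i+1 = len: last element, B's rest is []
      have hnil : song.drop (i + 1) = [] := by
        apply List.drop_eq_nil_of_le; omega
      have hd1 : song.drop i = [song[i]] := by
        rw [List.drop_eq_getElem_cons h, hnil]
      rw [hd1, renderB.eq_def]
      simp only []
      rw [if_neg (by omega : ¬ (i + 1 ≠ song.length ∧ pvCell song (i + 1) 2 = 0))]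
      rw [vibLoop_eq_render song (i + 1), hnil, renderB]
      simp only [hjump, List.append_nil]
      congr 2
      rw [cell_drop song i 3 h]
      by_cases hi : 0 < i
      · by_cases hl : getVibrationForOctaveJump (pvCell song (i-1) 0) (pvCell song i 0) = "" <;>
          simp [hi, hl, join_one, join_two, String.append_assoc]
      · simp [hi, join_one]
  · rw [vibLoop]
    simp only [h, dif_neg, not_false_iff]
    rw [List.drop_eq_nil_of_le (by omega), renderB]
    simp
termination_by song.length - i

-- ===== VERDICT (by name: the statement is the Claim_ definition above) =====
theorem getVibrationMessage_spec : Claim_equal_getVibrationMessage := by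
  intro song _ _
  unfold Spec_getVibrationMessage getVibrationMessage getVibrationMessage_alt
  rw [vibLoop_eq_render]
  simp [prevOf]
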